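-- pv_equiv track=rewrite | github.com/MBilal26/isItSAFE | isItSafeURL/src/detector.py | canonicalize_domain
-- ===== SOURCE A (Python) =====
-- def canonicalize_domain(domain):
--     """
--     Unmasks common visual substitutions to find underlying brands.
--     e.g., 'rn' -> 'm', '0' -> 'o', '1' -> 'l'
--     """
--     subs = {
--         'rn': 'm',
--         'vv': 'w',
--         'cl': 'd',
--         '0': 'o',
--         '1': 'i',
--         '|': 'l',
--         '8': 'b',
--         '5': 's',
--         'q': 'g'
--     }
--     canon = domain.lower()
--     for old, new in subs.items():
--         canon = canon.replace(old, new)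
--     return canon
-- ===== SOURCE B (Python) =====
-- def canonicalize_domain(domain):
--     """
--     Unmasks common visual substitutions to find underlying brands.
--     Single left-to-right pass over the lowercased string instead of
--     nine sequential full-string replace() scans.
--     """
--     SUB2 = {'rn': 'm', 'vv': 'w', 'cl': 'd'}
--     SUB1 = {'0': 'o', '1': 'i', '|': 'l', '8': 'b', '5': 's', 'q': 'g'}
--     s = domain.lower()
--     out = []
--     i = 0
--     n = len(s)
--     while i < n:
--         pair = s[i:i + 2]
--         if pair in SUB2:
--             out.append(SUB2[pair])
--             i += 2
--         else:
--             out.append(SUB1.get(s[i], s[i]))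
--             i += 1
--     return ''.join(out)
-- ===== Notes on version B (the rewrite author's own statement) =====
-- stated objective: alternative
-- what changed: Replaces nine sequential full-string str.replace passes (eight intermediate strings) with one left-to-right scan that tries a 2-char substitution, then a 1-char substitution, at each position; valid because the patterns are character-disjoint and replacements never create new patterns.
import Mathlib
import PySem

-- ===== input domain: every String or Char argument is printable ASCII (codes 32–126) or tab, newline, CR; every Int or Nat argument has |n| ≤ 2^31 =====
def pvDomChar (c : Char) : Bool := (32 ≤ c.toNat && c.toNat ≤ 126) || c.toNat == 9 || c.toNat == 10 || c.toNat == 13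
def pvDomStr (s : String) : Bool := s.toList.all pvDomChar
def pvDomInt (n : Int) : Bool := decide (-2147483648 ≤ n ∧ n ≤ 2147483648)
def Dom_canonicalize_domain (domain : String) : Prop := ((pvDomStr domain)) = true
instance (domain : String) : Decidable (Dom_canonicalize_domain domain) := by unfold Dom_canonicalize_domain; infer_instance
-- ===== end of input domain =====

-- B replaces A's nine sequential full-string str.replace passes with one left-to-right
-- scan (2-char match first, else 1-char, else copy); objective: alternative single-pass algorithm.

-- ===== PORT A =====
def canonicalize_domain (domain : String) : String :=
  List.foldl (fun canon p => PySem.Str.replace canon p.1 p.2)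
    (PySem.Str.lower domain)
    [("rn","m"),("vv","w"),("cl","d"),("0","o"),("1","i"),("|","l"),("8","b"),("5","s"),("q","g")]

-- ===== PORT B =====
-- the 2-char substitution table (SUB2 in Source B)
def pvSub2? (a b : Char) : Option Char :=
  if a = 'r' ∧ b = 'n' then some 'm'
  else if a = 'v' ∧ b = 'v' then some 'w'
  else if a = 'c' ∧ b = 'l' then some 'd'
  else none

-- the 1-char substitution table with default (SUB1.get(c, c) in Source B)
def pvSub1 (c : Char) : Char :=
  if c = '0' then 'o'
  else if c = '1' then 'i'
  else if c = '|' then 'l'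
  else if c = '8' then 'b'
  else if c = '5' then 's'
  else if c = 'q' then 'g'
  else c

-- the left-to-right index loop of Source B as structural recursion
def pvScan : List Char → List Char
  | [] => []
  | [c] => [pvSub1 c]
  | a :: b :: t =>
    match pvSub2? a b with
    | some r => r :: pvScan t
    | none => pvSub1 a :: pvScan (b :: t)

def canonicalize_domain_alt (domain : String) : String :=
  String.ofList (pvScan (PySem.Str.lower domain).toList)

-- ===== PRECONDITION & SPEC =====
def Spec_canonicalize_domain (domain : String) (out : String) : Prop := out = canonicalize_domain_alt domain
instance (domain : String) (out : String) : Decidable (Spec_canonicalize_domain domain out) := by unfold Spec_canonicalize_domain; infer_instance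

-- ===== CLAIM (what is proved, stated in full; the proofs are below) =====
def Claim_equal_canonicalize_domain : Prop := ∀ (domain : String), Dom_canonicalize_domain domain → Spec_canonicalize_domain domain (canonicalize_domain domain)

-- ===== LEMMAS AND PROOFS =====

-- A's nine replace passes, expressed on List Char
def pvChain (l : List Char) : List Char :=
  PySem.Chars.replace (PySem.Chars.replace (PySem.Chars.replace (PySem.Chars.replace
    (PySem.Chars.replace (PySem.Chars.replace (PySem.Chars.replace (PySem.Chars.replace
      (PySem.Chars.replace l ['r','n'] ['m']) ['v','v'] ['w']) ['c','l'] ['d'])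
        ['0'] ['o']) ['1'] ['i']) ['|'] ['l']) ['8'] ['b']) ['5'] ['s']) ['q'] ['g']

theorem go_zero (old new l acc) : PySem.Chars.replace.go old new 0 l acc = acc.reverse ++ l := by
  rw [PySem.Chars.replace.go.eq_def]
theorem go_nil (old new f acc) : PySem.Chars.replace.go old new f [] acc = acc.reverse ++ [] := by
  cases f <;> rw [PySem.Chars.replace.go.eq_def] <;> simp
theorem go_cons (old new f c t acc) :
    PySem.Chars.replace.go old new (f+1) (c::t) acc =
      if old.isPrefixOf (c::t) then PySem.Chars.replace.go old new f (List.drop old.length (c::t)) (new.reverse ++ acc)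
      else PySem.Chars.replace.go old new f t (c :: acc) := by
  rw [PySem.Chars.replace.go.eq_def]
theorem go_acc (old new : List Char) (f : Nat) : ∀ (l acc : List Char),
    PySem.Chars.replace.go old new f l acc = acc.reverse ++ PySem.Chars.replace.go old new f l [] := by
  induction f with
  | zero => intro l acc; rw [go_zero, go_zero]; simp
  | succ f ih =>
    intro l acc
    match l with
    | [] => rw [go_nil, go_nil]; simp
    | c :: t =>
      rw [go_cons, go_cons]
      by_cases h : old.isPrefixOf (c :: t)
      · simp only [h, if_pos]
        rw [ih (List.drop old.length (c :: t)) (new.reverse ++ acc),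
            ih (List.drop old.length (c :: t)) (new.reverse ++ [])]
        simp
      · simp only [h, ite_false, Bool.false_eq_true]
        rw [ih t (c :: acc), ih t [c]]
        simp
theorem go_fuel (old new : List Char) (hold : old ≠ []) : ∀ (f1 f2 : Nat) (l acc : List Char),
    l.length ≤ f1 → l.length ≤ f2 →
    PySem.Chars.replace.go old new f1 l acc = PySem.Chars.replace.go old new f2 l acc := by
  intro f1
  induction f1 with
  | zero =>
    intro f2 l acc h1 h2
    cases l with
    | nil => rw [go_zero, go_nil]
    | cons c t => simp at h1
  | succ f ih =>
    intro f2 l acc h1 h2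
    match l with
    | [] => rw [go_nil, go_nil]
    | c :: t =>
      match f2 with
      | 0 => simp at h2
      | f2' + 1 =>
        rw [go_cons, go_cons]
        have hol : 1 ≤ old.length := by cases old with | nil => exact absurd rfl hold | cons o os => simp
        by_cases h : old.isPrefixOf (c :: t)
        · simp only [h, if_pos]
          apply ih <;> simp [List.length_drop] <;> simp at h1 h2 <;> omega
        · simp only [h, ite_false, Bool.false_eq_true]
          apply ih <;> simp_all

theorem rep_nil (o : Char) (os new : List Char) : PySem.Chars.replace [] (o::os) new = [] := by
  rw [PySem.Chars.replace]
  simp only [List.isEmpty_cons, List.length_nil]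
  rw [go_zero]
  simp
theorem rep_cons_ne (c o : Char) (t os new : List Char) (h : o ≠ c) :
    PySem.Chars.replace (c::t) (o::os) new = c :: PySem.Chars.replace t (o::os) new := by
  rw [PySem.Chars.replace, PySem.Chars.replace]
  simp only [List.isEmpty_cons, List.length_cons]
  rw [go_cons]
  have hp : (o::os).isPrefixOf (c::t) = false := by
    simp [List.isPrefixOf, h]
  rw [hp]
  simp only [Bool.false_eq_true, if_false]
  rw [go_acc]
  simp
theorem rep2_cons_snd (a b c : Char) (t new : List Char) (h : t.head? ≠ some b) :
    PySem.Chars.replace (c::t) [a,b] new = c :: PySem.Chars.replace t [a,b] new := by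
  rw [PySem.Chars.replace, PySem.Chars.replace]
  simp only [List.isEmpty_cons, List.length_cons]
  rw [go_cons]
  have hp : [a,b].isPrefixOf (c::t) = false := by
    cases t with
    | nil => simp [List.isPrefixOf]
    | cons d t' =>
      simp only [List.head?_cons, ne_eq, Option.some.injEq] at h
      simp only [List.isPrefixOf, Bool.and_eq_false_iff, beq_eq_false_iff_ne, ne_eq]
      tauto
  rw [hp]
  simp only [Bool.false_eq_true, if_false]
  rw [go_acc]
  simp
theorem rep2_match (a b : Char) (t new : List Char) :
    PySem.Chars.replace (a::b::t) [a,b] new = new ++ PySem.Chars.replace t [a,b] new := by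
  rw [PySem.Chars.replace, PySem.Chars.replace]
  simp only [List.isEmpty_cons, Bool.false_eq_true, if_false, List.length_cons]
  rw [go_cons]
  have hp : [a,b].isPrefixOf (a::b::t) = true := by simp [List.isPrefixOf]
  rw [hp, if_pos rfl]
  rw [go_acc]
  simp only [List.length_cons, List.length_nil, List.drop_succ_cons, List.drop_zero,
    List.append_nil, List.reverse_reverse]
  rw [go_fuel [a,b] new (by simp) (t.length + 1) t.length t [] (by simp) (by simp)]
theorem rep1_match (a : Char) (t new : List Char) :
    PySem.Chars.replace (a::t) [a] new = new ++ PySem.Chars.replace t [a] new := by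
  rw [PySem.Chars.replace, PySem.Chars.replace]
  simp only [List.isEmpty_cons, List.length_cons]
  rw [go_cons]
  have hp : [a].isPrefixOf (a::t) = true := by simp [List.isPrefixOf]
  rw [hp, if_pos rfl]
  rw [go_acc]
  simp

-- head of a 2-char/1-output replace is either the replacement or the original head
theorem rep_head2 (a b n c : Char) (t : List Char) :
    (PySem.Chars.replace (c::t) [a,b] [n]).head? = some n ∨
    (PySem.Chars.replace (c::t) [a,b] [n]).head? = some c := by
  cases t with
  | nil =>
    right
    rw [rep2_cons_snd _ _ _ _ _ (by simp), rep_nil]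
    simp
  | cons d t' =>
    by_cases hac : a = c
    · by_cases hbd : b = d
      · subst hac hbd
        left
        rw [rep2_match]
        simp
      · right
        rw [rep2_cons_snd _ _ _ _ _ (by simp; exact fun e => hbd e.symm)]
        simp
    · right
      rw [rep_cons_ne _ _ _ _ _ hac]
      simp

-- A's nine passes equal B's single scan, by strong induction on the list
theorem chain_eq : ∀ (n : Nat) (l : List Char), l.length ≤ n → pvChain l = pvScan l := by
  intro n
  induction n with
  | zero =>
    intro l h
    have hnil : l = [] := by cases l with | nil => rfl | cons c t => simp at h
    subst hnil
    simp [pvChain, rep_nil, pvScan]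
  | succ n ih =>
    intro l hl
    match l with
    | [] => simp [pvChain, rep_nil, pvScan]
    | [a] =>
      have h2 : ∀ (x y : Char) (nw : List Char), PySem.Chars.replace [a] [x,y] nw = [a] := by
        intro x y nw
        rw [rep2_cons_snd _ _ _ _ _ (by simp), rep_nil]
      by_cases h0 : a = '0'
      · subst h0; decide
      by_cases h1 : a = '1'
      · subst h1; decide
      by_cases hbar : a = '|'
      · subst hbar; decide
      by_cases h8 : a = '8'
      · subst h8; decide
      by_cases h5 : a = '5'
      · subst h5; decide
      by_cases hq : a = 'q'
      · subst hq; decide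
      have n0 : ('0':Char) ≠ a := fun e => h0 e.symm
      have n1 : ('1':Char) ≠ a := fun e => h1 e.symm
      have nbar : ('|':Char) ≠ a := fun e => hbar e.symm
      have n8 : ('8':Char) ≠ a := fun e => h8 e.symm
      have n5 : ('5':Char) ≠ a := fun e => h5 e.symm
      have nq : ('q':Char) ≠ a := fun e => hq e.symm
      simp [pvChain, h2, rep_cons_ne, rep_nil, n0, n1, nbar, n8, n5, nq,
        pvScan, pvSub1, h0, h1, hbar, h8, h5, hq]
    | a :: b :: t =>
      have hlt : t.length ≤ n := by simp at hl; omega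
      have hlbt : (b :: t).length ≤ n := by simp at hl ⊢; omega
      by_cases hrn : a = 'r' ∧ b = 'n'
      · obtain ⟨ha, hb⟩ := hrn; subst ha hb
        have iht := ih t hlt
        simp only [pvChain] at iht
        simp [pvChain, rep2_match, rep_cons_ne, iht, pvScan, pvSub2?]
      by_cases hvvb : a = 'v' ∧ b = 'v'
      · obtain ⟨ha, hb⟩ := hvvb; subst ha hb
        have iht := ih t hlt
        simp only [pvChain] at iht
        simp [pvChain, rep2_match, rep_cons_ne, iht, pvScan, pvSub2?]
      by_cases hclb : a = 'c' ∧ b = 'l'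
      · obtain ⟨ha, hb⟩ := hclb; subst ha hb
        have iht := ih t hlt
        simp only [pvChain] at iht
        simp [pvChain, rep2_match, rep_cons_ne, iht, pvScan, pvSub2?]
      by_cases har : a = 'r'
      · subst har
        have hb : b ≠ 'n' := fun e => hrn ⟨rfl, e⟩
        have iht := ih (b :: t) hlbt
        simp only [pvChain] at iht
        simp only [pvChain]
        rw [rep2_cons_snd 'r' 'n' 'r' (b::t) ['m'] (by simp [hb])]
        simp [rep_cons_ne, iht, pvScan, pvSub2?, pvSub1, hb]
      by_cases hav : a = 'v'
      · subst hav
        have hb : b ≠ 'v' := fun e => hvvb ⟨rfl, e⟩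
        have iht := ih (b :: t) hlbt
        simp only [pvChain] at iht
        simp only [pvChain]
        rw [rep_cons_ne 'v' 'r' (b::t) ['n'] ['m'] (by decide)]
        have hh : (PySem.Chars.replace (b::t) ['r','n'] ['m']).head? ≠ some 'v' := by
          rcases rep_head2 'r' 'n' 'm' b t with h | h <;> rw [h] <;> simp [hb]
        rw [rep2_cons_snd 'v' 'v' 'v' _ ['w'] hh]
        simp [rep_cons_ne, iht, pvScan, pvSub2?, pvSub1, hb]
      by_cases hac : a = 'c'
      · subst hac
        have hb : b ≠ 'l' := fun e => hclb ⟨rfl, e⟩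
        have iht := ih (b :: t) hlbt
        simp only [pvChain] at iht
        simp only [pvChain]
        rw [rep_cons_ne 'c' 'r' (b::t) ['n'] ['m'] (by decide)]
        have hh : (PySem.Chars.replace (PySem.Chars.replace (b::t) ['r','n'] ['m'])
            ['v','v'] ['w']).head? ≠ some 'l' := by
          rcases rep_head2 'r' 'n' 'm' b t with h1 | h1 <;>
          · obtain ⟨T1, hT1⟩ := List.head?_eq_some_iff.mp h1
            rw [hT1]
            rcases rep_head2 'v' 'v' 'w' _ T1 with h2 | h2 <;> rw [h2] <;> simp [hb]
        rw [rep_cons_ne 'c' 'v' _ ['v'] ['w'] (by decide)]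
        rw [rep2_cons_snd 'c' 'l' 'c' _ ['d'] hh]
        simp [rep_cons_ne, iht, pvScan, pvSub2?, pvSub1, hb]
      have nr : ('r':Char) ≠ a := fun e => har e.symm
      have nv : ('v':Char) ≠ a := fun e => hav e.symm
      have nc : ('c':Char) ≠ a := fun e => hac e.symm
      have iht := ih (b :: t) hlbt
      simp only [pvChain] at iht
      by_cases h0 : a = '0'
      · subst h0
        simp [pvChain, rep_cons_ne, rep1_match, iht, pvScan, pvSub2?, pvSub1]
      by_cases h1 : a = '1'
      · subst h1
        simp [pvChain, rep_cons_ne, rep1_match, iht, pvScan, pvSub2?, pvSub1]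
      by_cases hbar : a = '|'
      · subst hbar
        simp [pvChain, rep_cons_ne, rep1_match, iht, pvScan, pvSub2?, pvSub1]
      by_cases h8 : a = '8'
      · subst h8
        simp [pvChain, rep_cons_ne, rep1_match, iht, pvScan, pvSub2?, pvSub1]
      by_cases h5 : a = '5'
      · subst h5
        simp [pvChain, rep_cons_ne, rep1_match, iht, pvScan, pvSub2?, pvSub1]
      by_cases hq : a = 'q'
      · subst hq
        simp [pvChain, rep_cons_ne, rep1_match, iht, pvScan, pvSub2?, pvSub1]
      have n0 : ('0':Char) ≠ a := fun e => h0 e.symm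
      have n1 : ('1':Char) ≠ a := fun e => h1 e.symm
      have nbar : ('|':Char) ≠ a := fun e => hbar e.symm
      have n8 : ('8':Char) ≠ a := fun e => h8 e.symm
      have n5 : ('5':Char) ≠ a := fun e => h5 e.symm
      have nq : ('q':Char) ≠ a := fun e => hq e.symm
      simp [pvChain, rep_cons_ne, nr, nv, nc, n0, n1, nbar, n8, n5, nq, iht,
        pvScan, pvSub2?, pvSub1, har, hav, hac, h0, h1, hbar, h8, h5, hq]


theorem portA_toList (d : String) :
    (canonicalize_domain d).toList = pvChain (PySem.Str.lower d).toList := by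
  simp [canonicalize_domain, pvChain, List.foldl, PySem.Str.toList_replace]

theorem portB_toList (d : String) :
    (canonicalize_domain_alt d).toList = pvScan (PySem.Str.lower d).toList := by
  simp [canonicalize_domain_alt, String.toList_ofList]

-- ===== VERDICT (by name: the statement is the Claim_ definition above) =====
theorem canonicalize_domain_spec : Claim_equal_canonicalize_domain := by
  intro d _
  unfold Spec_canonicalize_domain
  apply String.toList_inj.mp
  rw [portA_toList, portB_toList]
  exact chain_eq ((PySem.Str.lower d).toList).length _ le_rfl
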